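-- pv_equiv track=rewrite | github.com/five82/encodeworkflow | python/drapto/src/drapto/video_processor.py | _format_ffmpeg_command
-- ===== SOURCE A (Python) =====
-- def _format_ffmpeg_command(cmd: list[str]) -> str:
--     """Format FFmpeg command for readable output.
--
--     Args:
--         cmd: FFmpeg command as list of arguments
--
--     Returns:
--         Formatted command string
--     """
--     # Group related arguments together
--     formatted_parts = []
--     i = 0
--     while i < len(cmd):
--         if cmd[i].startswith('-'):
--             # Collect all values for this flag
--             values = []
--             i += 1
--             while i < len(cmd) and not cmd[i].startswith('-'):
--                 values.append(cmd[i])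
--                 i += 1
--             formatted_parts.append(f"{cmd[i-len(values)-1]} {' '.join(values)}")
--         else:
--             formatted_parts.append(cmd[i])
--             i += 1
--
--     # Join with newlines and indent
--     return "    " + "\n    ".join(formatted_parts)
-- ===== SOURCE B (Python) =====
-- def _format_ffmpeg_command(cmd: list[str]) -> str:
--     """Two-pass: group tokens (a flag opens a group that absorbs following
--     non-flag tokens; a standalone token is its own group), then format."""
--     groups = []
--     for tok in cmd:
--         if tok.startswith('-'):
--             groups.append([tok])
--         elif groups and groups[-1][0].startswith('-'):
--             groups[-1].append(tok)
--         else: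
--             groups.append([tok])
--     parts = [f"{g[0]} {' '.join(g[1:])}" if g[0].startswith('-') else g[0]
--              for g in groups]
--     return "    " + "\n    ".join(parts)
-- ===== Notes on version B (the rewrite author's own statement) =====
-- stated objective: alternative
-- what changed: Replaced A's index-driven while loop with a nested value-collecting inner while by a two-pass build-structure-then-format decomposition: one fold builds explicit token groups, a second pass formats each group.
import Mathlib
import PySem

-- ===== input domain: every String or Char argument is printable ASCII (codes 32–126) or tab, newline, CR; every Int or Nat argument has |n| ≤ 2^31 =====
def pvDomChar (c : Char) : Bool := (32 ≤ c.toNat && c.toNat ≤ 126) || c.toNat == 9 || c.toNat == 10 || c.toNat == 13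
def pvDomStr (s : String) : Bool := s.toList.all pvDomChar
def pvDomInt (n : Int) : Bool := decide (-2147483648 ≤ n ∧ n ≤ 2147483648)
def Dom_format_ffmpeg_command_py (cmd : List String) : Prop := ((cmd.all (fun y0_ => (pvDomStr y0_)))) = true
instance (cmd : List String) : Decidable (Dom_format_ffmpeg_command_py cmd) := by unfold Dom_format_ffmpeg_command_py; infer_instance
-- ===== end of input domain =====

-- B replaces A's index-driven nested while loops by a two-pass group-then-format decomposition (objective: alternative, same cost).

-- ===== PORT A =====
-- shared predicate: token is not a flag (does not start with '-')
def pvNonFlag (s : String) : Bool := !(PySem.Str.startswith s "-")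

-- A's outer while over index i, transliterated as recursion on the remaining suffix;
-- the inner value-collecting while is the takeWhile/dropWhile split of that suffix.
def formatAGo : List String → List String
  | [] => []
  | t :: rest =>
    if PySem.Str.startswith t "-" then
      (t ++ " " ++ PySem.Str.join " " (rest.takeWhile pvNonFlag))
        :: formatAGo (rest.dropWhile pvNonFlag)
    else
      t :: formatAGo rest
termination_by l => l.length
decreasing_by
  · exact Nat.lt_succ_of_le (rest.length_dropWhile_le pvNonFlag)
  · simp

def format_ffmpeg_command_py (cmd : List String) : String :=
  "    " ++ PySem.Str.join "\n    " (formatAGo cmd)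

-- ===== PORT B =====
-- B's for loop: groups kept head-first (head = most recent group), each group as
-- (first token, following tokens in reverse) — the standard functional transcription
-- of append-at-end mutation; everything is re-reversed when formatting.
def pvStepB (groups : List (String × List String)) (tok : String) :
    List (String × List String) :=
  if PySem.Str.startswith tok "-" then (tok, []) :: groups
  else
    match groups with
    | (h, vs) :: gs =>
      if PySem.Str.startswith h "-" then (h, tok :: vs) :: gs
      else (tok, []) :: (h, vs) :: gs
    | [] => [(tok, [])]

def pvFmtB (g : String × List String) : String :=
  if PySem.Str.startswith g.1 "-" then g.1 ++ " " ++ PySem.Str.join " " g.2.reverse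
  else g.1

def format_ffmpeg_command_py_alt (cmd : List String) : String :=
  "    " ++ PySem.Str.join "\n    " (((cmd.foldl pvStepB []).reverse).map pvFmtB)

-- ===== PRECONDITION & SPEC =====
def Spec_format_ffmpeg_command_py (cmd : List String) (out : String) : Prop := out = format_ffmpeg_command_py_alt cmd
instance (cmd : List String) (out : String) : Decidable (Spec_format_ffmpeg_command_py cmd out) := by unfold Spec_format_ffmpeg_command_py; infer_instance

-- ===== CLAIM (what is proved, stated in full; the proofs are below) =====
def Claim_equal_format_ffmpeg_command_py : Prop := ∀ (cmd : List String), Dom_format_ffmpeg_command_py cmd → Spec_format_ffmpeg_command_py cmd (format_ffmpeg_command_py cmd)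

-- ===== LEMMAS AND PROOFS =====

def renderB (gs : List (String × List String)) : List String := gs.reverse.map pvFmtB

theorem renderB_cons (g : String × List String) (gs : List (String × List String)) :
    renderB (g :: gs) = renderB gs ++ [pvFmtB g] := by simp [renderB]

theorem formatAGo_nil : formatAGo [] = [] := by simp [formatAGo]

theorem formatAGo_cons_flag (t : String) (rest : List String)
    (ht : PySem.Str.startswith t "-" = true) :
    formatAGo (t :: rest) =
      (t ++ " " ++ PySem.Str.join " " (rest.takeWhile pvNonFlag))
        :: formatAGo (rest.dropWhile pvNonFlag) := by
  have ht' : PySem.Chars.startswith t.toList ['-'] = true := by simpa using ht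
  rw [formatAGo]; simp [ht']

theorem formatAGo_cons_nonflag (t : String) (rest : List String)
    (ht : PySem.Str.startswith t "-" = false) :
    formatAGo (t :: rest) = t :: formatAGo rest := by
  have ht' : PySem.Chars.startswith t.toList ['-'] = false := by simpa using ht
  rw [formatAGo]; simp [ht']

-- invariant when the most recent group is an open flag group
theorem foldl_open (cmd : List String) :
    ∀ (gs : List (String × List String)) (h : String) (vs : List String),
    PySem.Str.startswith h "-" = true →
    renderB (cmd.foldl pvStepB ((h, vs) :: gs)) =
      renderB gs ++
        (h ++ " " ++ PySem.Str.join " " (vs.reverse ++ cmd.takeWhile pvNonFlag))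
          :: formatAGo (cmd.dropWhile pvNonFlag) := by
  induction cmd with
  | nil =>
    intro gs h vs hh
    have hh' : PySem.Chars.startswith h.toList ['-'] = true := by simpa using hh
    simp [renderB_cons, pvFmtB, hh', formatAGo_nil]
  | cons t rest ih =>
    intro gs h vs hh
    have hh' : PySem.Chars.startswith h.toList ['-'] = true := by simpa using hh
    by_cases ht : PySem.Str.startswith t "-" = true
    · have ht' : PySem.Chars.startswith t.toList ['-'] = true := by simpa using ht
      have hnf : pvNonFlag t = false := by simp [pvNonFlag, ht']
      rw [List.foldl_cons]
      have hstep : pvStepB ((h, vs) :: gs) t = (t, []) :: (h, vs) :: gs := by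
        simp [pvStepB, ht']
      rw [hstep, ih ((h, vs) :: gs) t [] ht]
      simp [renderB_cons, pvFmtB, hh', hnf, formatAGo_cons_flag t rest ht]
    · have ht2 : PySem.Str.startswith t "-" = false := by
        cases hx : PySem.Str.startswith t "-" <;> simp_all
      have ht' : PySem.Chars.startswith t.toList ['-'] = false := by simpa using ht2
      have hnf : pvNonFlag t = true := by simp [pvNonFlag, ht']
      rw [List.foldl_cons]
      have hstep : pvStepB ((h, vs) :: gs) t = (h, t :: vs) :: gs := by
        simp [pvStepB, ht', hh']
      rw [hstep, ih gs h (t :: vs) hh]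
      simp [hnf, List.append_assoc]

-- invariant when there is no open flag group (empty, or last group standalone)
theorem foldl_closed (cmd : List String) :
    ∀ (gs : List (String × List String)),
    (∀ p ∈ gs.head?, PySem.Str.startswith p.1 "-" = false) →
    renderB (cmd.foldl pvStepB gs) = renderB gs ++ formatAGo cmd := by
  induction cmd with
  | nil => intro gs _; simp [formatAGo_nil]
  | cons t rest ih =>
    intro gs hgs
    by_cases ht : PySem.Str.startswith t "-" = true
    · have ht' : PySem.Chars.startswith t.toList ['-'] = true := by simpa using ht
      rw [List.foldl_cons]
      have hstep : pvStepB gs t = (t, []) :: gs := by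
        cases gs with
        | nil => simp [pvStepB, ht']
        | cons g gs' =>
          have hg : PySem.Chars.startswith g.1.toList ['-'] = false := by
            simpa using hgs g (by simp)
          simp [pvStepB, ht']
      rw [hstep, foldl_open rest gs t [] ht]
      simp [formatAGo_cons_flag t rest ht]
    · have ht2 : PySem.Str.startswith t "-" = false := by
        cases hx : PySem.Str.startswith t "-" <;> simp_all
      have ht' : PySem.Chars.startswith t.toList ['-'] = false := by simpa using ht2
      rw [List.foldl_cons]
      have hstep : pvStepB gs t = (t, []) :: gs := by
        cases gs with
        | nil => simp [pvStepB, ht']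
        | cons g gs' =>
          have hg : PySem.Chars.startswith g.1.toList ['-'] = false := by
            simpa using hgs g (by simp)
          simp [pvStepB, ht', hg]
      rw [hstep, ih ((t, []) :: gs) (by intro p hp; simp at hp; subst hp; exact ht2)]
      simp [renderB_cons, pvFmtB, ht', formatAGo_cons_nonflag t rest ht2,
        List.append_assoc]

-- ===== VERDICT (by name: the statement is the Claim_ definition above) =====
theorem format_ffmpeg_command_py_spec : Claim_equal_format_ffmpeg_command_py := by
  intro cmd _
  show format_ffmpeg_command_py cmd = format_ffmpeg_command_py_alt cmd
  unfold format_ffmpeg_command_py format_ffmpeg_command_py_alt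
  have h := foldl_closed cmd [] (by intro p hp; simp at hp)
  simp only [renderB] at h
  rw [h]
  simp
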